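-- pv_equiv track=rewrite | github.com/YarinKalfon45/Machine-Learning | Assignment 3 - Word Prediction/ML_DL_Functions3.py | generate_4grams
-- ===== SOURCE A (Python) =====
-- def generate_4grams(seqs): # 10% grade
--     """
--     This function takes a list of sentences (list of lists) and returns
--     a new list containing the 4-grams (four consequentively occuring words)
--     that appear in the sentences. Note that a unique 4-gram can appear multiple
--     times, one per each time that the 4-gram appears in the data parameter `seqs`.
--
--     Example:
--
--     >>> generate_4grams([[148, 98, 70, 23, 154, 89], [151, 148, 181, 246], [248]])
--     [[148, 98, 70, 23], [98, 70, 23, 154], [70, 23, 154, 89], [151, 148, 181, 246]]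
--     >>> generate_4grams([[1, 1, 1, 1, 1]])
--     [[1, 1, 1, 1], [1, 1, 1, 1]]
--     """
--     four_grams = []
--     for seq in seqs:
--       if len(seq) > 3:
--         for i in range(len(seq)-3):
--           four_gram =[]
--           for j in range(4):
--             four_gram.append(seq[i+j])
--           four_grams.append(four_gram)
--     return four_grams
-- ===== SOURCE B (Python) =====
-- def generate_4grams(seqs):
--     four_grams = []
--     for seq in seqs:
--         window = []
--         for x in seq:
--             window.append(x)
--             if len(window) > 4:
--                 window.pop(0)
--             if len(window) == 4:
--                 four_grams.append(list(window))
--     return four_grams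
-- ===== Notes on version B (the rewrite author's own statement) =====
-- stated objective: alternative
-- what changed: Replaced A's random-access index arithmetic (i over range(len(seq)-3), inner j-loop, explicit len(seq)>3 guard) by a streaming pass that maintains a bounded FIFO window of the last 4 elements via append/pop(0) and emits a copy whenever the window is full, with no indexing, slicing or length guard.
import Mathlib
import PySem

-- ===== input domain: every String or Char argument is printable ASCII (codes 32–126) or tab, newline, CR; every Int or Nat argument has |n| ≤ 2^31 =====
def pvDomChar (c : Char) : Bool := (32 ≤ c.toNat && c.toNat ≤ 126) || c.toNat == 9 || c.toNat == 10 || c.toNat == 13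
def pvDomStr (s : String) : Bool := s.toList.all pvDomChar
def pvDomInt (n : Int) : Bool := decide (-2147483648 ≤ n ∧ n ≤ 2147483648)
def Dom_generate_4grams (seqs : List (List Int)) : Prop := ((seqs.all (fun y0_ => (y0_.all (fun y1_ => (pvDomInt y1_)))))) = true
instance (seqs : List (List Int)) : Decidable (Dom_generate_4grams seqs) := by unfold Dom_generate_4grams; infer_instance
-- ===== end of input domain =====

-- B replaces A's index-based nested loops and length guard by a streaming pass that
-- maintains a bounded FIFO window of the last 4 elements (objective: alternative).


-- ===== PORT A =====
-- literal transliteration of A: outer loop over seqs, length guard, index loops i and j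
def generate_4grams (seqs : List (List Int)) : List (List Int) :=
  seqs.foldl (fun four_grams seq =>
    if 3 < seq.length then
      (PySem.List.pyRange 0 ((seq.length : Int) - 3) 1).foldl
        (fun fgs i =>
          fgs ++ [(PySem.List.pyRange 0 4 1).foldl
            (fun four_gram j => four_gram ++ [PySem.List.pyGetD seq (i + j) 0]) []])
        four_grams
    else four_grams) []

-- ===== PORT B =====
-- B's inner-loop body: window.append(x); if len(window) > 4: window.pop(0);
-- if len(window) == 4: four_grams.append(list(window))
def pvStep (st : List Int × List (List Int)) (x : Int) : List Int × List (List Int) :=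
  let w1 := st.1 ++ [x]
  let w2 := if 4 < w1.length then w1.drop 1 else w1
  (w2, if w2.length == 4 then st.2 ++ [w2] else st.2)

-- literal transliteration of B: stream each sequence through a bounded FIFO window
def generate_4grams_alt (seqs : List (List Int)) : List (List Int) :=
  seqs.foldl (fun four_grams seq => (seq.foldl pvStep ([], four_grams)).2) []

-- ===== PRECONDITION & SPEC =====
def Spec_generate_4grams (seqs : List (List Int)) (out : List (List Int)) : Prop := out = generate_4grams_alt seqs
instance (seqs : List (List Int)) (out : List (List Int)) : Decidable (Spec_generate_4grams seqs out) := by unfold Spec_generate_4grams; infer_instance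

-- ===== CLAIM (what is proved, stated in full; the proofs are below) =====
def Claim_equal_generate_4grams : Prop := ∀ (seqs : List (List Int)), Dom_generate_4grams seqs → Spec_generate_4grams seqs (generate_4grams seqs)

-- ===== LEMMAS AND PROOFS =====

-- the per-sequence list of 4-grams, written via zips (proof vocabulary only)
def pvZipForm (seq : List Int) : List (List Int) :=
  (((seq.zip (seq.drop 1)).zip (seq.drop 2)).zip (seq.drop 3)).map
    (fun t => [t.1.1.1, t.1.1.2, t.1.2, t.2])

-- A's per-sequence block, written as Lean's `range`-map
def pvRangeForm (seq : List Int) : List (List Int) :=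
  (List.range (seq.length - 3)).map
    (fun k => [seq.getD k 0, seq.getD (k+1) 0, seq.getD (k+2) 0, seq.getD (k+3) 0])

lemma mapA_eq_rangeForm (seq : List Int) (h : 3 < seq.length) :
    (PySem.List.pyRange 0 ((seq.length : Int) - 3) 1).map
      (fun i => ([0, 1, 2, 3] : List Int).foldl
        (fun four_gram j => four_gram ++ [PySem.List.pyGetD seq (i + j) 0]) [])
    = pvRangeForm seq := by
  have hr : ((seq.length : Int) - 3) = ((seq.length - 3 : Nat) : Int) := by omega
  rw [hr, PySem.List.pyRange_one, Int.sub_zero, Int.toNat_natCast, List.map_map]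
  unfold pvRangeForm
  apply List.map_congr_left
  intro k _
  simp only [Function.comp, List.foldl]
  have e1 : (0 : Int) + (k : Int) + 1 = ((k + 1 : Nat) : Int) := by push_cast; ring
  have e2 : (0 : Int) + (k : Int) + 2 = ((k + 2 : Nat) : Int) := by push_cast; ring
  have e3 : (0 : Int) + (k : Int) + 3 = ((k + 3 : Nat) : Int) := by push_cast; ring
  rw [e1, e2, e3]
  simp only [PySem.List.pyGetD_natCast]
  simp [List.getD]

lemma rangeForm_eq_zipForm (seq : List Int) : pvRangeForm seq = pvZipForm seq := by
  induction seq with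
  | nil => rfl
  | cons a t ih =>
    rcases t with _ | ⟨b, t1⟩
    · rfl
    rcases t1 with _ | ⟨c, t2⟩
    · rfl
    rcases t2 with _ | ⟨d, r⟩
    · rfl
    unfold pvRangeForm pvZipForm at *
    have hlen : (a :: b :: c :: d :: r).length - 3 = ((b :: c :: d :: r).length - 3) + 1 := by
      simp only [List.length_cons]; omega
    rw [hlen, List.range_succ_eq_map, List.map_cons, List.map_map]
    have hhead :
        [List.getD (a :: b :: c :: d :: r) 0 0, List.getD (a :: b :: c :: d :: r) (0+1) 0,
         List.getD (a :: b :: c :: d :: r) (0+2) 0, List.getD (a :: b :: c :: d :: r) (0+3) 0]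
        = [a, b, c, d] := by simp [List.getD]
    have hshift :
        ((fun k => [List.getD (a :: b :: c :: d :: r) k 0,
                    List.getD (a :: b :: c :: d :: r) (k+1) 0,
                    List.getD (a :: b :: c :: d :: r) (k+2) 0,
                    List.getD (a :: b :: c :: d :: r) (k+3) 0]) ∘ Nat.succ)
        = (fun k => [List.getD (b :: c :: d :: r) k 0,
                     List.getD (b :: c :: d :: r) (k+1) 0,
                     List.getD (b :: c :: d :: r) (k+2) 0,
                     List.getD (b :: c :: d :: r) (k+3) 0]) := by
      funext k
      simp [Function.comp, Nat.succ_eq_add_one,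
            show ∀ m : Nat, k + 1 + m = (k + m) + 1 from fun m => by omega]
    rw [hhead, hshift, ih]
    simp [List.zip]

lemma zipForm_nil_of_short (s : List Int) (h : ¬ 3 < s.length) : pvZipForm s = [] := by
  rw [← rangeForm_eq_zipForm]
  unfold pvRangeForm
  have h0 : s.length - 3 = 0 := by omega
  rw [h0]; simp

lemma zipForm_cons (a b c d : Int) (r : List Int) :
    pvZipForm (a :: b :: c :: d :: r) = [a, b, c, d] :: pvZipForm (b :: c :: d :: r) := rfl

-- streaming invariant once the window is full: the fold emits exactly the
-- 4-grams of (last three window elements ++ remaining input)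
lemma streamFull (rest : List Int) : ∀ (p q s t : Int) (acc : List (List Int)),
    (rest.foldl pvStep ([p, q, s, t], acc)).2 = acc ++ pvZipForm (q :: s :: t :: rest) := by
  induction rest with
  | nil =>
    intro p q s t acc
    simp [pvZipForm]
  | cons x r ih =>
    intro p q s t acc
    have hstep : pvStep ([p, q, s, t], acc) x = ([q, s, t, x], acc ++ [[q, s, t, x]]) := by
      simp [pvStep]
    rw [List.foldl_cons, hstep, ih, zipForm_cons, List.append_assoc]
    rfl

-- per-sequence: the streaming fold starting from the empty window produces the 4-grams
lemma stream_eq_zipForm (seq : List Int) (acc : List (List Int)) :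
    (seq.foldl pvStep ([], acc)).2 = acc ++ pvZipForm seq := by
  rcases seq with _ | ⟨a, t⟩
  · simp [pvZipForm]
  rcases t with _ | ⟨b, t1⟩
  · simp [pvStep, pvZipForm]
  rcases t1 with _ | ⟨c, t2⟩
  · simp [pvStep, pvZipForm]
  rcases t2 with _ | ⟨d, r⟩
  · simp [pvStep, pvZipForm]
  have hwarm : pvStep (pvStep (pvStep (pvStep ([], acc) a) b) c) d
      = ([a, b, c, d], acc ++ [[a, b, c, d]]) := by
    simp [pvStep]
  rw [show (a :: b :: c :: d :: r).foldl pvStep ([], acc)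
        = r.foldl pvStep (pvStep (pvStep (pvStep (pvStep ([], acc) a) b) c) d) from rfl,
      hwarm, streamFull, zipForm_cons, List.append_assoc]
  rfl

-- A's fold, flattened
lemma foldA_flat (seqs : List (List Int)) (acc : List (List Int)) :
    seqs.foldl (fun four_grams seq =>
      if 3 < seq.length then
        (PySem.List.pyRange 0 ((seq.length : Int) - 3) 1).foldl
          (fun fgs i =>
            fgs ++ [(PySem.List.pyRange 0 4 1).foldl
              (fun four_gram j => four_gram ++ [PySem.List.pyGetD seq (i + j) 0]) []])
          four_grams
      else four_grams) acc
    = acc ++ seqs.flatMap pvZipForm := by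
  induction seqs generalizing acc with
  | nil => simp
  | cons s rest ih =>
    rw [List.foldl_cons, ih, List.flatMap_cons]
    have h4 : PySem.List.pyRange 0 4 1 = [0, 1, 2, 3] := by decide
    by_cases h : 3 < s.length
    · simp only [h, if_pos, h4]
      rw [PySem.List.foldl_append_singleton_eq_map, mapA_eq_rangeForm s h,
          rangeForm_eq_zipForm, List.append_assoc]
    · simp only [h, if_neg, not_false_iff]
      rw [zipForm_nil_of_short s h, List.nil_append]

-- B's fold, flattened
lemma foldB_flat (seqs : List (List Int)) (acc : List (List Int)) :
    seqs.foldl (fun four_grams seq => (seq.foldl pvStep ([], four_grams)).2) acc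
    = acc ++ seqs.flatMap pvZipForm := by
  induction seqs generalizing acc with
  | nil => simp
  | cons s rest ih =>
    rw [List.foldl_cons, stream_eq_zipForm, ih, List.flatMap_cons, List.append_assoc]

-- ===== VERDICT (by name: the statement is the Claim_ definition above) =====
theorem generate_4grams_spec : Claim_equal_generate_4grams := by
  intro seqs _
  unfold Spec_generate_4grams generate_4grams generate_4grams_alt
  rw [foldA_flat, foldB_flat]
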